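-- pv_equiv track=rewrite | github.com/valeriuo/rosalind | src/15_LCSM.py | lcsm
-- ===== SOURCE A (Python) =====
-- def lcsm(r1, r2):
--     cs = []
--     for i in range(len(r1)-1):
--         for j in range(2, len(r1)-i+1):
--             if (r1[i:i+j] in r2):
--                 if (r1[i:i+j] not in cs):
--                     cs.append(r1[i:i+j])
--                 if (j > 2):
--                     cs.remove(r1[i:i+j-1])
--             else:
--                 break
--     return cs
-- ===== SOURCE B (Python) =====
-- def lcsm(r1, r2):
--     # Two-pointer matching statistics: the longest match length at start i+1
--     # is at least (longest at i) - 1, so each 'in r2' test either extends the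
--     # match or moves to the next start.  Per start, only the removals of the
--     # shorter prefixes and one final append are replayed on the result list.
--     cs = []
--     n = len(r1)
--     m = 0
--     for i in range(n - 1):
--         if m > 0:
--             m -= 1
--         while i + m < n and r1[i:i + m + 1] in r2:
--             m += 1
--         if m >= 2:
--             for j in range(2, m):
--                 s = r1[i:i + j]
--                 if s in cs:
--                     cs.remove(s)
--             t = r1[i:i + m]
--             if t not in cs:
--                 cs.append(t)
--     return cs
-- ===== Notes on version B (the rewrite author's own statement) =====
-- stated objective: faster
-- what changed: Replaces the per-start rescan from length 2 (quadratically many 'in r2' substring tests) by two-pointer matching statistics (the longest match at start i+1 is at least the longest at i minus 1), then replays only the net list effect per start: remove the shorter prefixes if present and append the maximal match if absent.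
import Mathlib
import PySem

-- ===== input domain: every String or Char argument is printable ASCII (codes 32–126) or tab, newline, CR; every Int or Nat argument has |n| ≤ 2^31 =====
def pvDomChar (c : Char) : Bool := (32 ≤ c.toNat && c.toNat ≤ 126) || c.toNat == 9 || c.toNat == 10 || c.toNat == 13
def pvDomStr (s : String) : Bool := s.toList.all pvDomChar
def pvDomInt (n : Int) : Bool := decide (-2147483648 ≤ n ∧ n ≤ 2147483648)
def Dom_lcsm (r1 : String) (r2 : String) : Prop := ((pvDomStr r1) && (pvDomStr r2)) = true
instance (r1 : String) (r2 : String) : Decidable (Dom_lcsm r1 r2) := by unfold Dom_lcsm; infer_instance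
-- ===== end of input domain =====

-- B replaces A's per-start rescan of all extensions (quadratically many 'in r2' substring
-- tests) by two-pointer matching statistics plus a replay of the net list effect per start.

-- ===== PORT A =====
-- inner 'for j in range(2, len(r1)-i+1): … else break' loop, recursion over the j-list
def lcsmInner (t1 t2 : List Char) (i : Nat) : List (List Char) → List Nat → List (List Char)
  | cs, [] => cs
  | cs, j :: js =>
      let sub := (t1.drop i).take j
      if PySem.Chars.isIn sub t2 then
        let cs1 := if sub ∈ cs then cs else cs ++ [sub]
        -- cs.remove(r1[i:i+j-1]): always present when reached (see proofs); getD is the total form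
        let cs2 := if 2 < j then (PySem.List.remove? cs1 ((t1.drop i).take (j - 1))).getD cs1 else cs1
        lcsmInner t1 t2 i cs2 js
      else cs

def lcsm (r1 : String) (r2 : String) : List String :=
  ((List.range (r1.toList.length - 1)).foldl
      (fun cs i => lcsmInner r1.toList r2.toList i cs
        (List.range' 2 (r1.toList.length - i - 1))) []).map String.ofList

-- ===== PORT B =====
-- 'while i + m < n and r1[i:i+m+1] in r2: m += 1', fuel = n - i - m
def lcsmExtend (t1 t2 : List Char) (i : Nat) : Nat → Nat → Nat
  | 0, m => m
  | fuel + 1, m =>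
      if PySem.Chars.isIn ((t1.drop i).take (m + 1)) t2 then lcsmExtend t1 t2 i fuel (m + 1) else m

-- one iteration of B's main loop: decrement, extend, replay removals, final append
def lcsmStep (t1 t2 : List Char) (st : List (List Char) × Nat) (i : Nat) :
    List (List Char) × Nat :=
  let cs := st.1
  let m0 := st.2 - 1                             -- if m > 0: m -= 1
  let m := lcsmExtend t1 t2 i (t1.length - i - m0) m0
  if 2 ≤ m then
    let cs2 := (List.range' 2 (m - 2)).foldl
      (fun c j =>
        let s := (t1.drop i).take j
        if s ∈ c then (PySem.List.remove? c s).getD c else c) cs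
    let t := (t1.drop i).take m
    (if t ∈ cs2 then cs2 else cs2 ++ [t], m)
  else (cs, m)

def lcsm_alt (r1 : String) (r2 : String) : List String :=
  ((List.range (r1.toList.length - 1)).foldl
      (lcsmStep r1.toList r2.toList) ([], 0)).1.map String.ofList

-- ===== PRECONDITION & SPEC =====
def Spec_lcsm (r1 : String) (r2 : String) (out : List String) : Prop := out = lcsm_alt r1 r2
instance (r1 : String) (r2 : String) (out : List String) : Decidable (Spec_lcsm r1 r2 out) := by unfold Spec_lcsm; infer_instance

-- ===== CLAIM (what is proved, stated in full; the proofs are below) =====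
def Claim_equal_lcsm : Prop := ∀ (r1 : String) (r2 : String), Dom_lcsm r1 r2 → Spec_lcsm r1 r2 (lcsm r1 r2)

-- ===== LEMMAS AND PROOFS =====

-- proof-side views of 'append if absent' / 'remove if present'
def appIf (cs : List (List Char)) (s : List Char) : List (List Char) :=
  if s ∈ cs then cs else cs ++ [s]

def remIf (cs : List (List Char)) (s : List Char) : List (List Char) :=
  if s ∈ cs then cs.erase s else cs

theorem removeGetD_eq_remIf (cs : List (List Char)) (s : List Char) :
    (PySem.List.remove? cs s).getD cs = remIf cs s := by
  by_cases h : s ∈ cs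
  · rw [PySem.List.remove?_eq_some_erase cs s h]; simp [remIf, h]
  · rw [(PySem.List.remove?_eq_none_iff cs s).mpr h]; simp [remIf, h]

-- the substring-of-r2 predicate for the window starting at i with length j
def ok (t1 t2 : List Char) (i j : Nat) : Prop := (t1.drop i).take j <:+: t2

theorem ok_mono {t1 t2 : List Char} {i j j' : Nat} (hle : j' ≤ j) (h : ok t1 t2 i j) :
    ok t1 t2 i j' := by
  have h1 : (t1.drop i).take j' <+: (t1.drop i).take j := by
    have := List.take_prefix j' ((t1.drop i).take j)
    rwa [List.take_take, Nat.min_eq_left hle] at this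
  exact h1.isInfix.trans h

theorem ok_shift {t1 t2 : List Char} {i m : Nat} (h : ok t1 t2 i m) :
    ok t1 t2 (i + 1) (m - 1) := by
  have hd : t1.drop (i + 1) = (t1.drop i).drop 1 := by rw [List.drop_drop]
  have h1 : (t1.drop (i + 1)).take (m - 1) = ((t1.drop i).take m).drop 1 := by
    rw [hd, List.drop_take]
  have h2 : ((t1.drop i).take m).drop 1 <:+ (t1.drop i).take m := List.drop_suffix 1 _
  rw [ok, h1]; exact h2.isInfix.trans h

-- canonical per-start maximal match length
def maxm (t1 t2 : List Char) (i : Nat) : Nat := lcsmExtend t1 t2 i (t1.length - i) 0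

theorem extend_spec (t1 t2 : List Char) (i : Nat) :
    ∀ fuel m, fuel = t1.length - i - m → m ≤ t1.length - i → ok t1 t2 i m →
      m ≤ lcsmExtend t1 t2 i fuel m ∧
      lcsmExtend t1 t2 i fuel m ≤ t1.length - i ∧
      ok t1 t2 i (lcsmExtend t1 t2 i fuel m) ∧
      (lcsmExtend t1 t2 i fuel m < t1.length - i →
        ¬ ok t1 t2 i (lcsmExtend t1 t2 i fuel m + 1)) := by
  intro fuel
  induction fuel with
  | zero =>
      intro m hf hle hok
      simp only [lcsmExtend]
      exact ⟨le_refl m, hle, hok, by omega⟩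
  | succ f ih =>
      intro m hf hle hok
      simp only [lcsmExtend]
      by_cases hin : PySem.Chars.isIn ((t1.drop i).take (m + 1)) t2 = true
      · rw [if_pos hin]
        have hok' : ok t1 t2 i (m + 1) := (PySem.Chars.isIn_iff_infix _ _).mp hin
        have := ih (m + 1) (by omega) (by omega) hok'
        exact ⟨by omega, this.2.1, this.2.2.1, this.2.2.2⟩
      · rw [if_neg hin]
        refine ⟨le_refl m, hle, hok, fun _ hok1 => ?_⟩
        exact ((PySem.Chars.isIn_eq_false_iff _ _).mp (by simpa using hin)) hok1

theorem maxm_spec (t1 t2 : List Char) (i : Nat) :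
    maxm t1 t2 i ≤ t1.length - i ∧ ok t1 t2 i (maxm t1 t2 i) ∧
      (maxm t1 t2 i < t1.length - i → ¬ ok t1 t2 i (maxm t1 t2 i + 1)) := by
  have := extend_spec t1 t2 i (t1.length - i) 0 (by omega) (by omega) (by simp [ok])
  exact ⟨this.2.1, this.2.2.1, this.2.2.2⟩

theorem extend_eq_maxm (t1 t2 : List Char) (i m : Nat)
    (hle : m ≤ t1.length - i) (hok : ok t1 t2 i m) :
    lcsmExtend t1 t2 i (t1.length - i - m) m = maxm t1 t2 i := by
  obtain ⟨h1, h2, h3, h4⟩ := extend_spec t1 t2 i (t1.length - i - m) m rfl hle hok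
  obtain ⟨g2, g3, g4⟩ := maxm_spec t1 t2 i
  set r := lcsmExtend t1 t2 i (t1.length - i - m) m
  set q := maxm t1 t2 i
  rcases Nat.lt_trichotomy r q with h | h | h
  · exact absurd (ok_mono (by omega) g3) (h4 (by omega))
  · exact h
  · exact absurd (ok_mono (by omega) h3) (g4 (by omega))

-- above-maxm extensions fail
theorem not_ok_above (t1 t2 : List Char) (i j : Nat) (hj : maxm t1 t2 i < j)
    (hjn : j ≤ t1.length - i) : ¬ ok t1 t2 i j := by
  obtain ⟨g2, g3, g4⟩ := maxm_spec t1 t2 i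
  intro h
  exact (g4 (by omega)) (ok_mono (by omega) h)

-- the one-step A body, with the remove in remIf form
def stepA (t1 : List Char) (i : Nat) (cs : List (List Char)) (j : Nat) : List (List Char) :=
  let cs1 := appIf cs ((t1.drop i).take j)
  if 2 < j then remIf cs1 ((t1.drop i).take (j - 1)) else cs1

-- the per-start net effect both loops realise
def canon (t1 t2 : List Char) (cs : List (List Char)) (i : Nat) : List (List Char) :=
  let M := maxm t1 t2 i
  if 2 ≤ M then
    appIf ((List.range' 2 (M - 2)).foldl (fun c j => remIf c ((t1.drop i).take j)) cs)
      ((t1.drop i).take M)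
  else cs

theorem appIf_remIf_comm (R : List (List Char)) (a b : List Char) (h : a ≠ b) :
    remIf (appIf (appIf R a) b) a = appIf (remIf R a) b := by
  by_cases ha : a ∈ R
  · by_cases hb : b ∈ R
    · simp [appIf, remIf, ha, hb, (List.mem_erase_of_ne h.symm).mpr hb]
    · have hb' : b ∉ R.erase a := fun hx => hb ((List.mem_erase_of_ne h.symm).mp hx)
      have hmem : a ∈ R ++ [b] := List.mem_append_left _ ha
      simp only [appIf, remIf, if_pos ha, if_neg hb, if_pos hmem, if_neg hb']
      exact List.erase_append_left _ ha
  · by_cases hb : b ∈ R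
    · have hba : b ∈ R ++ [a] := List.mem_append_left _ hb
      have haa : a ∈ R ++ [a] := by simp
      simp only [appIf, remIf, if_neg ha, if_pos hba, if_pos haa, if_pos hb]
      rw [List.erase_append_right _ ha]; simp
    · have hba : b ∉ R ++ [a] := by simp [hb, h.symm]
      have haa : a ∈ (R ++ [a]) ++ [b] := by simp
      simp only [appIf, remIf, if_neg ha, if_neg hba, if_pos haa, if_neg hb]
      rw [List.append_assoc, List.erase_append_right _ ha]; simp

-- window lengths are exact below length, hence adjacent windows differ
theorem sub_ne_sub_succ (t1 : List Char) (i j : Nat) (h : j + 1 ≤ t1.length - i) :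
    (t1.drop i).take j ≠ (t1.drop i).take (j + 1) := by
  intro he
  have := congrArg List.length he
  simp [List.length_take, List.length_drop] at this
  omega

-- core: the interleaved append/remove run for j = 2..M collapses to removals then one append
theorem netA (t1 : List Char) (i : Nat) :
    ∀ k cs, 2 + k ≤ t1.length - i →
      List.foldl (stepA t1 i) cs (List.range' 2 (k + 1)) =
        appIf ((List.range' 2 k).foldl (fun c j => remIf c ((t1.drop i).take j)) cs)
          ((t1.drop i).take (2 + k)) := by
  intro k
  induction k with
  | zero => intro cs _; simp [stepA]
  | succ k ih =>
      intro cs hk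
      have hsplit : List.range' 2 (k + 1 + 1) = List.range' 2 (k + 1) ++ [2 + (k + 1)] := by
        simpa using (List.range'_concat (step := 1) (s := 2) (n := k + 1))
      have hsplit2 : List.range' 2 (k + 1) = List.range' 2 k ++ [2 + k] := by
        simpa using (List.range'_concat (step := 1) (s := 2) (n := k))
      rw [hsplit, List.foldl_append, ih cs (by omega)]
      rw [hsplit2, List.foldl_append]
      simp only [List.foldl_cons, List.foldl_nil]
      have hne : (t1.drop i).take (2 + k) ≠ (t1.drop i).take (2 + k + 1) :=
        sub_ne_sub_succ t1 i (2 + k) (by omega)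
      have := appIf_remIf_comm (a := (t1.drop i).take (2 + k))
        (b := (t1.drop i).take (2 + (k + 1)))
        (R := List.foldl (fun c j => remIf c ((t1.drop i).take j)) cs (List.range' 2 k))
        (by simpa [show 2 + (k + 1) = 2 + k + 1 by omega] using hne)
      simp only [stepA, show (2 : Nat) < 2 + (k + 1) by omega, if_pos,
        show 2 + (k + 1) - 1 = 2 + k by omega]
      simpa [show 2 + (k + 1) = 2 + k + 1 by omega] using this

-- A's inner loop with break equals the full fold up to maxm
theorem innerA_eq (t1 t2 : List Char) (i : Nat) :
    ∀ len j₀, 2 ≤ j₀ → len = t1.length - i + 1 - j₀ → ∀ cs,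
      lcsmInner t1 t2 i cs (List.range' j₀ len) =
        List.foldl (stepA t1 i) cs (List.range' j₀ (maxm t1 t2 i + 1 - j₀)) := by
  intro len
  induction len with
  | zero =>
      intro j₀ h2 hlen cs
      have : maxm t1 t2 i + 1 - j₀ = 0 := by
        have := (maxm_spec t1 t2 i).1; omega
      simp [lcsmInner, this]
  | succ l ih =>
      intro j₀ h2 hlen cs
      rw [List.range'_succ]
      simp only [lcsmInner]
      by_cases hok : ok t1 t2 i j₀
      · have hin : PySem.Chars.isIn ((t1.drop i).take j₀) t2 = true :=
          (PySem.Chars.isIn_iff_infix _ _).mpr hok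
        rw [if_pos hin]
        have hjM : j₀ ≤ maxm t1 t2 i := by
          by_contra hgt
          exact not_ok_above t1 t2 i j₀ (by omega) (by omega) hok
        have hM : maxm t1 t2 i + 1 - j₀ = (maxm t1 t2 i + 1 - (j₀ + 1)) + 1 := by omega
        rw [hM, List.range'_succ, List.foldl_cons, ih (j₀ + 1) (by omega) (by omega)]
        congr 1
        simp only [stepA]
        by_cases hj2 : 2 < j₀ <;> simp [appIf, hj2, removeGetD_eq_remIf]
      · have hin : PySem.Chars.isIn ((t1.drop i).take j₀) t2 = false := by
          rw [PySem.Chars.isIn_eq_false_iff]; exact hok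
        rw [hin]
        have : maxm t1 t2 i + 1 - j₀ = 0 := by
          by_contra hne
          exact hok (ok_mono (by omega) ((maxm_spec t1 t2 i).2.1))
        simp [this]

-- A's per-start body equals canon
theorem Abody_eq_canon (t1 t2 : List Char) (i : Nat) (cs : List (List Char)) :
    lcsmInner t1 t2 i cs (List.range' 2 (t1.length - i - 1)) = canon t1 t2 cs i := by
  have h := innerA_eq t1 t2 i (t1.length - i - 1) 2 (by omega) (by omega) cs
  rw [h]
  obtain ⟨hle, hok, _⟩ := maxm_spec t1 t2 i
  by_cases h2 : 2 ≤ maxm t1 t2 i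
  · have hM : maxm t1 t2 i + 1 - 2 = (maxm t1 t2 i - 2) + 1 := by omega
    rw [hM, netA t1 i (maxm t1 t2 i - 2) cs (by omega)]
    simp only [canon, if_pos h2]
    congr 2
    omega
  · have : maxm t1 t2 i + 1 - 2 = 0 := by omega
    simp [this, canon, h2]

-- one step of B equals canon, carrying the matching-statistics invariant
theorem lcsmStep_eq (t1 t2 : List Char) (cs : List (List Char)) (m i : Nat)
    (hle : m - 1 ≤ t1.length - i) (hok : ok t1 t2 i (m - 1)) :
    lcsmStep t1 t2 (cs, m) i = (canon t1 t2 cs i, maxm t1 t2 i) := by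
  have hext : lcsmExtend t1 t2 i (t1.length - i - (m - 1)) (m - 1) = maxm t1 t2 i :=
    extend_eq_maxm t1 t2 i (m - 1) hle hok
  unfold lcsmStep
  simp only [hext]
  by_cases h2 : 2 ≤ maxm t1 t2 i
  · have hfold : List.foldl
        (fun c j =>
          if (t1.drop i).take j ∈ c then
            (PySem.List.remove? c ((t1.drop i).take j)).getD c
          else c) cs
        (List.range' 2 (maxm t1 t2 i - 2)) =
      List.foldl (fun c j => remIf c ((t1.drop i).take j)) cs
        (List.range' 2 (maxm t1 t2 i - 2)) := by
      apply PySem.List.foldl_congr_mem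
      intro c j _
      rw [removeGetD_eq_remIf]
      by_cases hmem : (t1.drop i).take j ∈ c <;> simp [remIf, hmem]
    simp only [canon, if_pos h2, hfold, appIf]
  · simp [canon, h2]

-- B's fold carries m = previous maxm; its cs-projection is the canon fold
theorem Bfold_eq (t1 t2 : List Char) :
    ∀ k i₀ cs m, m - 1 ≤ t1.length - i₀ → ok t1 t2 i₀ (m - 1) →
      ((List.range' i₀ k).foldl (lcsmStep t1 t2) (cs, m)).1 =
        (List.range' i₀ k).foldl (canon t1 t2) cs := by
  intro k
  induction k with
  | zero => intro i₀ cs m _ _; simp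
  | succ l ih =>
      intro i₀ cs m hle hok
      rw [List.range'_succ, List.foldl_cons, List.foldl_cons,
        lcsmStep_eq t1 t2 cs m i₀ hle hok]
      obtain ⟨hMle, hMok, _⟩ := maxm_spec t1 t2 i₀
      exact ih (i₀ + 1) (canon t1 t2 cs i₀) (maxm t1 t2 i₀) (by omega) (ok_shift hMok)

-- ===== VERDICT (by name: the statement is the Claim_ definition above) =====
theorem lcsm_spec : Claim_equal_lcsm := by
  intro r1 r2 _
  unfold Spec_lcsm lcsm lcsm_alt
  congr 1
  rw [List.range_eq_range',
    Bfold_eq r1.toList r2.toList (r1.toList.length - 1) 0 [] 0 (by omega)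
      (by simp [ok])]
  apply PySem.List.foldl_congr_mem
  intro cs i _
  exact Abody_eq_canon r1.toList r2.toList i cs
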